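-- pv_equiv track=rewrite | github.com/debora-darosa/exercicios_python | desafios de código/teste16.py | filtrar_visuais
-- ===== SOURCE A (Python) =====
-- def filtrar_visuais(lista_visuais):
--     # Converter a string de entrada em uma lista
--     visuais = lista_visuais.split(", ")
--
--     # TODO: Normalize e remova duplicatas usando um conjunto
--     def normalizar_nome(nome):
--       return ' '.join(word.capitalize() for word in nome.split())
--
--     visuais = lista_visuais.split(", ")
--
--     conjunto_visuais = {normalizar_nome(visual.strip().lower()) for visual in visuais}
--     # TODO: Converta o conjunto de volta para uma lista ordenada:
--     lista_final = sorted(conjunto_visuais)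
--
--     # Unir a lista em uma string, separada por vírgulas
--     return ", ".join(lista_final)
-- ===== SOURCE B (Python) =====
-- def filtrar_visuais(lista_visuais):
--     # sort-then-unique instead of set-dedup-then-sort
--     def normalizar_nome(nome):
--         return ' '.join(word.capitalize() for word in nome.split())
--
--     def unicos(nomes, prev):
--         # adjacent-duplicate removal on an already sorted list
--         if not nomes:
--             return []
--         if nomes[0] == prev:
--             return unicos(nomes[1:], prev)
--         return [nomes[0]] + unicos(nomes[1:], nomes[0])
--
--     nomes = sorted(normalizar_nome(v.strip().lower()) for v in lista_visuais.split(", "))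
--     return ", ".join(unicos(nomes, None))
-- ===== Notes on version B (the rewrite author's own statement) =====
-- stated objective: alternative
-- what changed: B keeps duplicates while normalizing, sorts the full list, and removes adjacent duplicates in a single scan comparing each name to the previously kept one, instead of A's set-based dedup followed by sorting the set.
import Mathlib
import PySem

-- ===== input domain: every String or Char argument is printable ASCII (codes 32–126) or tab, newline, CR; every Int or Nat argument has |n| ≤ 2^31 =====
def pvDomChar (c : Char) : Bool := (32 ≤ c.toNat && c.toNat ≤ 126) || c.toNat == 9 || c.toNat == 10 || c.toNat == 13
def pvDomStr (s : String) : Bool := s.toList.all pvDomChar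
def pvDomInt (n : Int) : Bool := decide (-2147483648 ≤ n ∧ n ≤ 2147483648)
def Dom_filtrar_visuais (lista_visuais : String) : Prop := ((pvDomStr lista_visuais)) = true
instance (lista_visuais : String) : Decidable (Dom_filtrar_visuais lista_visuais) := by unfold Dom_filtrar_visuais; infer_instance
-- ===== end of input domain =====

-- B replaces A's set-dedup-then-sort with sort-then-adjacent-unique (alternative decomposition, same cost).


-- ===== PORT A =====
-- word.capitalize(): first char uppercased, rest lowercased (exact on ASCII)
def pvCapitalize (w : String) : String :=
  match w.toList with
  | [] => ""
  | c :: rest => String.ofList (PySem.Chars.upperChar c :: rest.map PySem.Chars.lowerChar)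

def pvNormalizarNome (nome : String) : String :=
  PySem.Str.join " " ((PySem.Str.split₀ nome).map pvCapitalize)

def filtrar_visuais (lista_visuais : String) : String :=
  let visuais := (PySem.Str.split? lista_visuais ", ").getD []
  let conjunto_visuais : PySem.Set String :=
    PySem.Set.ofList (visuais.map (fun visual => pvNormalizarNome (PySem.Str.lower (PySem.Str.strip visual))))
  let lista_final := PySem.List.sorted conjunto_visuais (fun x => x)
  PySem.Str.join ", " lista_final

-- ===== PORT B =====
-- B's unicos(nomes, prev): drop elements equal to the previously kept one
def pvUnicos : Option String → List String → List String
  | _, [] => []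
  | prev, y :: t => if some y = prev then pvUnicos prev t else y :: pvUnicos (some y) t

def filtrar_visuais_alt (lista_visuais : String) : String :=
  let nomes := PySem.List.sorted
    (((PySem.Str.split? lista_visuais ", ").getD []).map
      (fun v => pvNormalizarNome (PySem.Str.lower (PySem.Str.strip v)))) (fun x => x)
  PySem.Str.join ", " (pvUnicos none nomes)

-- ===== PRECONDITION & SPEC =====
def Spec_filtrar_visuais (lista_visuais : String) (out : String) : Prop := out = filtrar_visuais_alt lista_visuais
instance (lista_visuais : String) (out : String) : Decidable (Spec_filtrar_visuais lista_visuais out) := by unfold Spec_filtrar_visuais; infer_instance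

-- ===== CLAIM (what is proved, stated in full; the proofs are below) =====
def Claim_equal_filtrar_visuais : Prop := ∀ (lista_visuais : String), Dom_filtrar_visuais lista_visuais → Spec_filtrar_visuais lista_visuais (filtrar_visuais lista_visuais)

-- ===== LEMMAS AND PROOFS =====

-- On a ≤-sorted list, pvUnicos yields a strictly increasing list whose members are
-- exactly the members of the list (other than a previously kept bound prev).
theorem pvUnicos_spec (l : List String) : ∀ (prev : Option String),
    l.Pairwise (· ≤ ·) → (∀ p, prev = some p → ∀ y ∈ l, p ≤ y) →
    (pvUnicos prev l).Pairwise (· < ·) ∧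
    (∀ z, z ∈ pvUnicos prev l ↔ z ∈ l ∧ some z ≠ prev) ∧
    (∀ p, prev = some p → ∀ z ∈ pvUnicos prev l, p < z) := by
  induction l with
  | nil => intro prev _ _; simp [pvUnicos]
  | cons y t ih =>
    intro prev hpw hlb
    have hy : ∀ z ∈ t, y ≤ z := fun z hz => List.rel_of_pairwise_cons hpw hz
    have hpt : t.Pairwise (· ≤ ·) := hpw.of_cons
    by_cases hc : some y = prev
    · -- duplicate of prev: skipped
      cases hc
      obtain ⟨h1, h2, h3⟩ := ih (some y) hpt (by
        rintro p hp z hz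
        injection hp with hp; exact hp ▸ hy z hz)
      simp only [pvUnicos, if_pos]
      refine ⟨h1, ?_, h3⟩
      intro z
      rw [h2 z]
      constructor
      · rintro ⟨hzt, hzp⟩; exact ⟨List.mem_cons_of_mem _ hzt, hzp⟩
      · rintro ⟨hzl, hzp⟩
        rcases List.mem_cons.mp hzl with rfl | h
        · exact absurd rfl hzp
        · exact ⟨h, hzp⟩
    · -- new element: kept
      obtain ⟨h1, h2, h3⟩ := ih (some y) hpt (by rintro p hp z hz; injection hp with hp; exact hp ▸ hy z hz)
      have hylt : ∀ z ∈ pvUnicos (some y) t, y < z := h3 y rfl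
      simp only [pvUnicos, if_neg hc]
      refine ⟨List.pairwise_cons.mpr ⟨hylt, h1⟩, ?_, ?_⟩
      · intro z
        constructor
        · intro hz
          rcases List.mem_cons.mp hz with rfl | hz'
          · exact ⟨List.mem_cons_self, hc⟩
          · obtain ⟨hzt, hzy⟩ := (h2 z).mp hz'
            refine ⟨List.mem_cons_of_mem _ hzt, ?_⟩
            intro hp
            have hzy' : z ≤ y := hlb z hp.symm y List.mem_cons_self
            have hyz : y ≤ z := hy z hzt
            exact hzy (congrArg some (le_antisymm hyz hzy').symm)
        · rintro ⟨hzl, hzp⟩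
          rcases List.mem_cons.mp hzl with rfl | hzt
          · exact List.mem_cons_self
          · by_cases hzy : z = y
            · exact hzy ▸ List.mem_cons_self
            · exact List.mem_cons_of_mem _ ((h2 z).mpr ⟨hzt, by simpa using hzy⟩)
      · rintro p hp z hz
        have hpy : p ≤ y := hlb p hp y List.mem_cons_self
        have hpy' : p < y := lt_of_le_of_ne hpy (fun h => hc (by rw [hp, h]))
        rcases List.mem_cons.mp hz with rfl | hz'
        · exact hpy'
        · exact lt_trans hpy' (hylt z hz')

-- sorted set-dedup = adjacent-unique of the sorted full list
theorem sorted_ofList_eq_unicos_sorted (ys : List String) :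
    PySem.List.sorted (PySem.Set.ofList ys) (fun x => x) = pvUnicos none (PySem.List.sorted ys (fun x => x)) := by
  obtain ⟨h1, h2, -⟩ := pvUnicos_spec (PySem.List.sorted ys (fun x => x)) none
    (PySem.List.sorted_pairwise ys (fun x => x)) (by rintro p ⟨⟩)
  have hnd : (pvUnicos none (PySem.List.sorted ys (fun x => x))).Nodup :=
    h1.imp (fun h => ne_of_lt h)
  apply PySem.List.sorted_eq_of_perm_of_pairwise_lt (PySem.Set.ofList ys)
    (pvUnicos none (PySem.List.sorted ys (fun x => x))) (fun x => x) _ h1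
  apply (List.perm_ext_iff_of_nodup hnd (PySem.Set.nodup_ofList ys)).mpr
  intro z
  rw [h2 z, PySem.Set.mem_ofList, PySem.List.mem_sorted]
  simp

-- ===== VERDICT (by name: the statement is the Claim_ definition above) =====
theorem filtrar_visuais_spec : Claim_equal_filtrar_visuais := by
  intro s _
  show filtrar_visuais s = filtrar_visuais_alt s
  simp only [filtrar_visuais, filtrar_visuais_alt]
  rw [sorted_ofList_eq_unicos_sorted]
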